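-- pv_equiv track=rewrite | github.com/bad-ants-fleet/drtransformer | drtransformer/rnafolding.py | findpath_merge
-- ===== SOURCE A (Python) =====
-- def merge_struct(outside, inside, i, j, slen = 4):
--     """Merge two structures into one (given vrna pairtable indices!)."""
--     if j is None:
--         return outside[:i-1] + inside
--     else:
--         return outside[:i-1] + inside[:-1] + outside[j-len(inside)+slen:]
--
-- def findpath_merge(outside, inside, i, j):
--     """ Merge two composable findpath runs.
--
--     This is a simplified variant which just appends the two runs ...
--     """
--     starten = outside[0][1] + inside[0][1]
--     bh1 = bh2 = 0
--
--     path1 = []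
--     stepI, enI = inside[0]
--     for stepO, enO in outside:
--         merged = merge_struct(stepO, stepI, i, j)
--         energy = enO + enI - starten
--         path1.append((merged, energy))
--         bh1 = max(bh1, energy)
--     stepO, enO = outside[-1]
--     for stepI, enI in inside[1:]:
--         merged = merge_struct(stepO, stepI, i, j)
--         energy = enO + enI - starten
--         path1.append((merged, energy))
--         bh1 = max(bh1, energy)
--
--     path2 = []
--     stepO, enO = outside[0]
--     for stepI, enI in inside:
--         merged = merge_struct(stepO, stepI, i, j)
--         energy = enO + enI - starten
--         path2.append((merged, energy))
--         bh2 = max(bh2, energy)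
--     stepI, enI = inside[-1]
--     for stepO, enO in outside[1:]:
--         merged = merge_struct(stepO, stepI, i, j)
--         energy = enO + enI - starten
--         bh2 = max(bh2, energy)
--         path2.append((merged, energy))
--     return (path1, bh1) if bh1 < bh2 else (path2, bh2)
-- ===== SOURCE B (Python) =====
-- def merge_struct(outside, inside, i, j, slen=4):
--     """Merge two structures into one (given vrna pairtable indices!)."""
--     if j is None:
--         return outside[:i-1] + inside
--     return outside[:i-1] + inside[:-1] + outside[j-len(inside)+slen:]
--
--
-- def _leg(steps, fixed_s, fixed_e, outside_varies, i, j, starten):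
--     """One leg of a merged path: every step merged with one fixed structure."""
--     if outside_varies:
--         return [(merge_struct(s, fixed_s, i, j), e + fixed_e - starten)
--                 for s, e in steps]
--     return [(merge_struct(fixed_s, s, i, j), fixed_e + e - starten)
--             for s, e in steps]
--
--
-- def findpath_merge(outside, inside, i, j):
--     """Merge two composable findpath runs.
--
--     Barriers come from a closed form over the two energy maxima; only the
--     winning path's merged structures are materialized.
--     """
--     eO0, eI0 = outside[0][1], inside[0][1]
--     starten = eO0 + eI0
--     maxO = max(e for _, e in outside)
--     maxI = max(e for _, e in inside)
--     eOlast, eIlast = outside[-1][1], inside[-1][1]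
--     bh1 = max(0, maxO + eI0 - starten, eOlast + maxI - starten)
--     bh2 = max(0, eO0 + maxI - starten, maxO + eIlast - starten)
--     if bh1 < bh2:
--         path = _leg(outside, inside[0][0], eI0, True, i, j, starten) \
--              + _leg(inside[1:], outside[-1][0], eOlast, False, i, j, starten)
--         return path, bh1
--     path = _leg(inside, outside[0][0], eO0, False, i, j, starten) \
--          + _leg(outside[1:], inside[-1][0], eIlast, True, i, j, starten)
--     return path, bh2
-- ===== Notes on version B (the rewrite author's own statement) =====
-- stated objective: alternative
-- what changed: B replaces A's two accumulate-append-and-running-max loops per path with a closed-form barrier computed from just the two energy maxima max(outside)/max(inside) (using that the redundant corner terms never exceed them), then materializes only the winning path via a single shared _leg helper; A builds both full paths while tracking barriers element by element.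
-- outside the precondition, e.g. on findpath_merge([], [('..', 0)], 1, None): A raises IndexError, B raises IndexError
import Mathlib
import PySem

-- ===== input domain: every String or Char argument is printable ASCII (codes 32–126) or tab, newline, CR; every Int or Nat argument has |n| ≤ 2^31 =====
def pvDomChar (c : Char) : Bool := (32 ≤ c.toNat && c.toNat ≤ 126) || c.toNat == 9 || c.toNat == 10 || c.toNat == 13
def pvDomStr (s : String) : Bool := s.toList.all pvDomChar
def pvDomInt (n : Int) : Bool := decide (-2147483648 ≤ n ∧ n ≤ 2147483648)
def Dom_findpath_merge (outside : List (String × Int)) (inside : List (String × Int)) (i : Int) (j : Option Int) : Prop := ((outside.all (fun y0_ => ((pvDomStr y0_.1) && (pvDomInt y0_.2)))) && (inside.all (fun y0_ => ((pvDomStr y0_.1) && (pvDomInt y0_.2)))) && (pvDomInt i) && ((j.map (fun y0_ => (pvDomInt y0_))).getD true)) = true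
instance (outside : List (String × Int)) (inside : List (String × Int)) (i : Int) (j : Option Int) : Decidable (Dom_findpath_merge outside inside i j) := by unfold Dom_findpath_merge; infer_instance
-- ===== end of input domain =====

-- B computes both barriers in closed form from the two energy maxima and builds
-- only the winning path's merged structures; the return value is unchanged.

-- shared helper: literal port of merge_struct (Python slicing via PySem.List.slice, exact)
def mergeStruct (outside : String) (inside : String) (i : Int) (j : Option Int) : String :=
  match j with
  | none => String.ofList (PySem.List.slice outside.toList none (some (i - 1)) ++ inside.toList)
  | some jv => String.ofList (PySem.List.slice outside.toList none (some (i - 1)) ++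
      PySem.List.slice inside.toList none (some (-1)) ++
      PySem.List.slice outside.toList (some (jv - (inside.toList.length : Int) + 4)) none)

-- ===== PORT A =====
def findpath_merge (outside : List (String × Int)) (inside : List (String × Int)) (i : Int) (j : Option Int) : (List (String × Int)) × Int :=
  match outside, inside with
  | (sO0, eO0) :: oT, (sI0, eI0) :: iT =>
    let starten := eO0 + eI0
    -- path1: full outside against inside[0], then last outside against inside[1:]
    let r1 := ((sO0, eO0) :: oT).foldl
      (fun (st : List (String × Int) × Int) p =>
        (st.1 ++ [(mergeStruct p.1 sI0 i j, p.2 + eI0 - starten)], max st.2 (p.2 + eI0 - starten)))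
      ([], 0)
    let lastO := ((sO0, eO0) :: oT).getLastD (sO0, eO0)
    let r1' := iT.foldl
      (fun (st : List (String × Int) × Int) p =>
        (st.1 ++ [(mergeStruct lastO.1 p.1 i j, lastO.2 + p.2 - starten)], max st.2 (lastO.2 + p.2 - starten)))
      r1
    -- path2: outside[0] against full inside, then outside[1:] against inside[-1]
    let r2 := ((sI0, eI0) :: iT).foldl
      (fun (st : List (String × Int) × Int) p =>
        (st.1 ++ [(mergeStruct sO0 p.1 i j, eO0 + p.2 - starten)], max st.2 (eO0 + p.2 - starten)))
      ([], 0)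
    let lastI := ((sI0, eI0) :: iT).getLastD (sI0, eI0)
    let r2' := oT.foldl
      (fun (st : List (String × Int) × Int) p =>
        (st.1 ++ [(mergeStruct p.1 lastI.1 i j, p.2 + lastI.2 - starten)], max st.2 (p.2 + lastI.2 - starten)))
      r2
    if r1'.2 < r2'.2 then r1' else r2'
  | _, _ => ([], 0)   -- unreachable under Pre_ (Python raises IndexError)

-- ===== PORT B =====
-- B-side copy of merge_struct (Source B defines it identically)
def mergeStructB (outside : String) (inside : String) (i : Int) (j : Option Int) : String :=
  match j with
  | none => String.ofList (PySem.List.slice outside.toList none (some (i - 1)) ++ inside.toList)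
  | some jv => String.ofList (PySem.List.slice outside.toList none (some (i - 1)) ++
      PySem.List.slice inside.toList none (some (-1)) ++
      PySem.List.slice outside.toList (some (jv - (inside.toList.length : Int) + 4)) none)

-- port of Source B's _leg helper
def pathLeg (steps : List (String × Int)) (fixedS : String) (fixedE : Int) (outsideVaries : Bool)
    (i : Int) (j : Option Int) (starten : Int) : List (String × Int) :=
  if outsideVaries then
    steps.map (fun p => (mergeStructB p.1 fixedS i j, p.2 + fixedE - starten))
  else
    steps.map (fun p => (mergeStructB fixedS p.1 i j, fixedE + p.2 - starten))

def findpath_merge_alt (outside : List (String × Int)) (inside : List (String × Int)) (i : Int) (j : Option Int) : (List (String × Int)) × Int :=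
  match outside with
  | [] => ([], 0)   -- unreachable under Pre_ (Python raises)
  | o0 :: oT =>
  match inside with
  | [] => ([], 0)   -- unreachable under Pre_ (Python raises)
  | i0 :: iT =>
    let eO0 := o0.2; let eI0 := i0.2
    let starten := eO0 + eI0
    let maxO := oT.foldl (fun m p => max m p.2) o0.2   -- max(e for _, e in outside)
    let maxI := iT.foldl (fun m p => max m p.2) i0.2   -- max(e for _, e in inside)
    let lastO := (o0 :: oT).getLastD o0
    let lastI := (i0 :: iT).getLastD i0
    let bh1 := max (max 0 (maxO + eI0 - starten)) (lastO.2 + maxI - starten)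
    let bh2 := max (max 0 (eO0 + maxI - starten)) (maxO + lastI.2 - starten)
    if bh1 < bh2 then
      (pathLeg (o0 :: oT) i0.1 eI0 true i j starten ++
       pathLeg iT lastO.1 lastO.2 false i j starten, bh1)
    else
      (pathLeg (i0 :: iT) o0.1 eO0 false i j starten ++
       pathLeg oT lastI.1 lastI.2 true i j starten, bh2)

-- ===== PRECONDITION & SPEC =====
-- Pre_ excludes exactly the inputs where Python A raises IndexError: empty outside or inside.
def Pre_findpath_merge (outside : List (String × Int)) (inside : List (String × Int)) (i : Int) (j : Option Int) : Prop :=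
  outside ≠ [] ∧ inside ≠ []
instance (outside : List (String × Int)) (inside : List (String × Int)) (i : Int) (j : Option Int) : Decidable (Pre_findpath_merge outside inside i j) := by unfold Pre_findpath_merge; infer_instance

def pvWitness_findpath_merge : (List (String × Int)) × (List (String × Int)) × Int × Option Int :=
  ([("((..))", 2)], [("..", -1)], 3, none)

def Spec_findpath_merge (outside : List (String × Int)) (inside : List (String × Int)) (i : Int) (j : Option Int) (out : (List (String × Int)) × Int) : Prop := out = findpath_merge_alt outside inside i j
instance (outside : List (String × Int)) (inside : List (String × Int)) (i : Int) (j : Option Int) (out : (List (String × Int)) × Int) : Decidable (Spec_findpath_merge outside inside i j out) := by unfold Spec_findpath_merge; infer_instance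

-- ===== CLAIM =====
def Claim_equal_findpath_merge : Prop := ∀ (outside : List (String × Int)) (inside : List (String × Int)) (i : Int) (j : Option Int), Dom_findpath_merge outside inside i j → Pre_findpath_merge outside inside i j → Spec_findpath_merge outside inside i j (findpath_merge outside inside i j)

-- ===== LEMMAS AND PROOFS =====

-- A's accumulating loop equals "map for the path, foldl max for the barrier".
theorem foldl_path_loop (l : List (String × Int)) (f : String × Int → String) (g : String × Int → Int)
    (p0 : List (String × Int)) (b0 : Int) :
    l.foldl (fun (st : List (String × Int) × Int) p => (st.1 ++ [(f p, g p)], max st.2 (g p))) (p0, b0)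
      = (p0 ++ l.map (fun p => (f p, g p)), (l.map g).foldl max b0) := by
  induction l generalizing p0 b0 with
  | nil => simp
  | cons h t ih => simp [List.foldl_cons, ih]

theorem foldl_max_comm (l : List Int) (a b : Int) :
    l.foldl max (max a b) = max a (l.foldl max b) := by
  induction l generalizing b with
  | nil => rfl
  | cons h t ih => simpa [List.foldl_cons, max_assoc] using ih (max b h)

theorem foldl_max_map_affine (l : List (String × Int)) (f : Int → Int)
    (hf : ∀ a b : Int, f (max a b) = max (f a) (f b)) (a : Int) :
    (l.map (fun p => f p.2)).foldl max (f a) = f (l.foldl (fun m p => max m p.2) a) := by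
  induction l generalizing a with
  | nil => rfl
  | cons h t ih => simpa [List.foldl_cons, hf] using ih (max a h.2)

theorem foldl_max_seed_mono (l : List (String × Int)) (a b : Int) (h : a ≤ b) :
    l.foldl (fun m p => max m p.2) a ≤ l.foldl (fun m p => max m p.2) b := by
  induction l generalizing a b with
  | nil => exact h
  | cons hd t ih => exact ih _ _ (max_le_max h le_rfl)

theorem getLastD_le_foldl_max (l : List (String × Int)) (d : String × Int) :
    (l.getLastD d).2 ≤ l.foldl (fun m p => max m p.2) d.2 := by
  induction l generalizing d with
  | nil => exact le_refl _
  | cons h t ih =>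
    rw [List.getLastD_cons, List.foldl_cons]
    calc (t.getLastD h).2 ≤ t.foldl (fun m p => max m p.2) h.2 := ih h
    _ ≤ t.foldl (fun m p => max m p.2) (max d.2 h.2) := foldl_max_seed_mono t _ _ (le_max_right _ _)

-- absorbing a seed that is dominated
theorem foldl_max_absorb (l : List Int) (a b : Int) (h : b ≤ a) :
    l.foldl max a = max a (l.foldl max b) := by
  have : max a b = a := by omega
  calc l.foldl max a = l.foldl max (max a b) := by rw [this]
  _ = max a (l.foldl max b) := foldl_max_comm l a b

theorem mergeStructB_eq : mergeStructB = mergeStruct := rfl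

-- barrier of one A-side path (start leg over full list, end leg over a tail)
-- equals B's closed form from the two maxima.
theorem barrier_closed_form (x0 : String × Int) (xT yT : List (String × Int))
    (y0e lastE : Int) (c : Int)
    (hlast : lastE ≤ xT.foldl (fun m p => max m p.2) x0.2) :
    (yT.map (fun p => lastE + p.2 - c)).foldl max
      (((x0 :: xT).map (fun p => p.2 + y0e - c)).foldl max 0)
    = max (max 0 ((xT.foldl (fun m p => max m p.2) x0.2) + y0e - c))
        (lastE + (yT.foldl (fun m p => max m p.2) y0e) - c) := by
  have hf1 : ∀ a b : Int, (fun x => x + y0e - c) (max a b)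
      = max ((fun x => x + y0e - c) a) ((fun x => x + y0e - c) b) := by
    intro a b; show max a b + y0e - c = max (a + y0e - c) (b + y0e - c); omega
  have hf2 : ∀ a b : Int, (fun x => lastE + x - c) (max a b)
      = max ((fun x => lastE + x - c) a) ((fun x => lastE + x - c) b) := by
    intro a b; show lastE + max a b - c = max (lastE + a - c) (lastE + b - c); omega
  have h1 : ((x0 :: xT).map (fun p => p.2 + y0e - c)).foldl max 0
      = max 0 ((xT.foldl (fun m p => max m p.2) x0.2) + y0e - c) := by
    rw [List.map_cons, List.foldl_cons, foldl_max_comm]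
    exact congrArg (max 0) (foldl_max_map_affine xT (fun x => x + y0e - c) hf1 x0.2)
  rw [h1]
  have hseed : lastE + y0e - c
      ≤ max 0 ((xT.foldl (fun m p => max m p.2) x0.2) + y0e - c) := by
    have := hlast
    have h := le_max_right (0 : Int) ((xT.foldl (fun m p => max m p.2) x0.2) + y0e - c)
    omega
  rw [foldl_max_absorb (yT.map (fun p => lastE + p.2 - c)) _ (lastE + y0e - c) hseed]
  exact congrArg (max _) (foldl_max_map_affine yT (fun x => lastE + x - c) hf2 y0e)

-- mirror form for path2: constant-first leg over the full list, varying-first leg over the tail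
theorem barrier_closed_form' (x0 : String × Int) (xT yT : List (String × Int))
    (y0e lastE : Int) (c : Int)
    (hlast : lastE ≤ xT.foldl (fun m p => max m p.2) x0.2) :
    (yT.map (fun p => p.2 + lastE - c)).foldl max
      (((x0 :: xT).map (fun p => y0e + p.2 - c)).foldl max 0)
    = max (max 0 (y0e + (xT.foldl (fun m p => max m p.2) x0.2) - c))
        ((yT.foldl (fun m p => max m p.2) y0e) + lastE - c) := by
  have hf1 : ∀ a b : Int, (fun x => y0e + x - c) (max a b)
      = max ((fun x => y0e + x - c) a) ((fun x => y0e + x - c) b) := by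
    intro a b; show y0e + max a b - c = max (y0e + a - c) (y0e + b - c); omega
  have hf2 : ∀ a b : Int, (fun x => x + lastE - c) (max a b)
      = max ((fun x => x + lastE - c) a) ((fun x => x + lastE - c) b) := by
    intro a b; show max a b + lastE - c = max (a + lastE - c) (b + lastE - c); omega
  have h1 : ((x0 :: xT).map (fun p => y0e + p.2 - c)).foldl max 0
      = max 0 (y0e + (xT.foldl (fun m p => max m p.2) x0.2) - c) := by
    rw [List.map_cons, List.foldl_cons, foldl_max_comm]
    exact congrArg (max 0) (foldl_max_map_affine xT (fun x => y0e + x - c) hf1 x0.2)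
  rw [h1]
  have hseed : y0e + lastE - c
      ≤ max 0 (y0e + (xT.foldl (fun m p => max m p.2) x0.2) - c) := by
    have := hlast
    have h := le_max_right (0 : Int) (y0e + (xT.foldl (fun m p => max m p.2) x0.2) - c)
    omega
  rw [foldl_max_absorb (yT.map (fun p => p.2 + lastE - c)) _ (y0e + lastE - c) hseed]
  exact congrArg (max _) (foldl_max_map_affine yT (fun x => x + lastE - c) hf2 y0e)

-- ===== VERDICT =====
theorem findpath_merge_spec : Claim_equal_findpath_merge := by
  intro outside inside i j _ hpre
  unfold Spec_findpath_merge
  match outside, inside with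
  | [], _ => exact absurd rfl hpre.1
  | _ :: _, [] => exact absurd rfl hpre.2
  | (sO0, eO0) :: oT, (sI0, eI0) :: iT =>
    show findpath_merge ((sO0, eO0) :: oT) ((sI0, eI0) :: iT) i j = _
    unfold findpath_merge findpath_merge_alt pathLeg
    simp only [foldl_path_loop, List.nil_append, mergeStructB_eq]
    have hO : (((sO0, eO0) :: oT).getLastD (sO0, eO0)).2
        ≤ oT.foldl (fun m p => max m p.2) eO0 := by
      rw [List.getLastD_cons]; exact getLastD_le_foldl_max oT (sO0, eO0)
    have hI : (((sI0, eI0) :: iT).getLastD (sI0, eI0)).2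
        ≤ iT.foldl (fun m p => max m p.2) eI0 := by
      rw [List.getLastD_cons]; exact getLastD_le_foldl_max iT (sI0, eI0)
    rw [barrier_closed_form (sO0, eO0) oT iT eI0 _ (eO0 + eI0) hO]
    rw [barrier_closed_form' (sI0, eI0) iT oT eO0 _ (eO0 + eI0) hI]
    simp
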